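-- pv_equiv track=rewrite | github.com/VanilCitatka/china_parse_bot | classes/itemlist.py | __count_symbs
-- ===== SOURCE A (Python) =====
-- def __count_symbs(itemlist):
--     titlelist = []
--     name = ''
--     for item in itemlist:
--         name = item['title'].strip()
--         titlelist.append(name)
--     titlestr = '\n'.join(titlelist)
--     return len(titlestr)
-- ===== SOURCE B (Python) =====
-- def __count_symbs(itemlist):
--     total = 0
--     count = 0
--     for item in itemlist:
--         total += len(item['title'].strip())
--         count += 1
--     return total + (count - 1 if count > 0 else 0)
-- ===== Notes on version B (the rewrite author's own statement) =====
-- stated objective: simpler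
-- what changed: B keeps an integer running total of stripped-title lengths and an item count, accounting for the newline separators by closed-form arithmetic (count-1), instead of building a list of titles, joining them with newlines and measuring the joined string.
import Mathlib
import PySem

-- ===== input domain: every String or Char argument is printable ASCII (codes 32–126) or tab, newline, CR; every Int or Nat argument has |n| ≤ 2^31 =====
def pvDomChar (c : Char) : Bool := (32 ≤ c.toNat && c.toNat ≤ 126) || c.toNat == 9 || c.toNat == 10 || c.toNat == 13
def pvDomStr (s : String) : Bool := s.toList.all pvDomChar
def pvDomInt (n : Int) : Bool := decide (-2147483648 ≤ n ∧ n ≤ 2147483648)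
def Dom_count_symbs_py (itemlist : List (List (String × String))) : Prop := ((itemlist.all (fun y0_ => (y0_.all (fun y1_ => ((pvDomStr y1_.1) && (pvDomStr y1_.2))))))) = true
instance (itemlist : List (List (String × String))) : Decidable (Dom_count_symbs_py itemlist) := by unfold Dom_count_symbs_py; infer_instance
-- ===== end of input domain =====

-- B keeps a running total and item count and adds count-1 for the separators, instead of
-- building a title list, joining with newlines and measuring the joined string.

-- ===== PORT A =====
-- builds titlelist by appending each stripped title, then measures '\n'.join(titlelist)
def count_symbs_py (itemlist : List (List (String × String))) : Int :=
  let st := itemlist.foldl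
    (fun (st : List String × String) item =>
      let name := PySem.Str.strip ((PySem.Dict.ofList item).getD "title" "")
      (st.1 ++ [name], name))
    ([], "")
  PySem.Str.len (PySem.Str.join "\n" st.1)

-- ===== PORT B =====
def count_symbs_py_alt (itemlist : List (List (String × String))) : Int :=
  let st := itemlist.foldl
    (fun (st : Int × Int) item =>
      (st.1 + PySem.Str.len (PySem.Str.strip ((PySem.Dict.ofList item).getD "title" "")), st.2 + 1))
    (0, 0)
  st.1 + (if st.2 > 0 then st.2 - 1 else 0)

-- ===== PRECONDITION & SPEC =====
-- Pre_ excludes items lacking the key 'title', on which Python A raises KeyError.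
def Pre_count_symbs_py (itemlist : List (List (String × String))) : Prop :=
  ∀ item ∈ itemlist, (PySem.Dict.ofList item).contains "title" = true
instance (itemlist : List (List (String × String))) : Decidable (Pre_count_symbs_py itemlist) := by unfold Pre_count_symbs_py; infer_instance
def pvWitness_count_symbs_py : (List (List (String × String))) := [[("title", "  hi ")], [("title", "x"), ("url", "u")]]

def Spec_count_symbs_py (itemlist : List (List (String × String))) (out : Int) : Prop := out = count_symbs_py_alt itemlist
instance (itemlist : List (List (String × String))) (out : Int) : Decidable (Spec_count_symbs_py itemlist out) := by unfold Spec_count_symbs_py; infer_instance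

-- ===== CLAIM (what is proved, stated in full; the proofs are below) =====
def Claim_equal_count_symbs_py : Prop := ∀ (itemlist : List (List (String × String))), Dom_count_symbs_py itemlist → Pre_count_symbs_py itemlist → Spec_count_symbs_py itemlist (count_symbs_py itemlist)

-- ===== LEMMAS AND PROOFS =====

def pvTitle (item : List (String × String)) : String :=
  PySem.Str.strip ((PySem.Dict.ofList item).getD "title" "")

def pvTitleLen (item : List (String × String)) : Int :=
  PySem.Str.len (pvTitle item)

theorem pvTitleLen_comp : PySem.Str.len ∘ pvTitle = pvTitleLen := rfl

theorem pvFoldA (itemlist : List (List (String × String))) (acc : List String) (nm : String) :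
    (itemlist.foldl
      (fun (st : List String × String) item =>
        let name := PySem.Str.strip ((PySem.Dict.ofList item).getD "title" "")
        (st.1 ++ [name], name)) (acc, nm)).1 = acc ++ itemlist.map pvTitle := by
  induction itemlist generalizing acc nm with
  | nil => simp
  | cons x xs ih => simp [List.foldl, ih, pvTitle]

theorem pvFoldB (itemlist : List (List (String × String))) (t c : Int) :
    itemlist.foldl
      (fun (st : Int × Int) item =>
        (st.1 + PySem.Str.len (PySem.Str.strip ((PySem.Dict.ofList item).getD "title" "")), st.2 + 1)) (t, c)
      = (t + (itemlist.map pvTitleLen).sum, c + itemlist.length) := by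
  induction itemlist generalizing t c with
  | nil => simp
  | cons x xs ih =>
    rw [List.foldl_cons]
    rw [show (((t, c).1 + PySem.Str.len (PySem.Str.strip ((PySem.Dict.ofList x).getD "title" "")),
        (t, c).2 + 1) : Int × Int) = (t + pvTitleLen x, c + 1) from rfl, ih]
    simp only [List.map_cons, List.sum_cons, List.length_cons, Prod.mk.injEq]
    constructor <;> push_cast <;> ring

theorem pvJoinLen (L : List String) :
    PySem.Str.len (PySem.Str.join "\n" L)
      = (L.map PySem.Str.len).sum + (if L = [] then 0 else (L.length : Int) - 1) := by
  induction L with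
  | nil => simp [PySem.Str.join, PySem.Str.len]
  | cons a rest ih =>
    cases rest with
    | nil => simp [PySem.Str.join, PySem.Str.len]
    | cons b bs =>
      have h : PySem.Str.len (PySem.Str.join "\n" (a :: b :: bs))
          = PySem.Str.len a + 1 + PySem.Str.len (PySem.Str.join "\n" (b :: bs)) := by
        simp [PySem.Chars.join_cons_cons]
        ring
      rw [h, ih]
      simp only [List.map_cons, List.sum_cons, List.length_cons, if_neg (List.cons_ne_nil b bs),
        if_neg (List.cons_ne_nil a (b :: bs))]
      push_cast
      ring

-- ===== VERDICT (by name: the statement is the Claim_ definition above) =====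
theorem count_symbs_py_spec : Claim_equal_count_symbs_py := by
  intro itemlist _ _
  unfold Spec_count_symbs_py count_symbs_py count_symbs_py_alt
  simp only [pvFoldA, pvFoldB, List.nil_append, pvJoinLen, List.map_map, pvTitleLen_comp,
    List.length_map, List.map_eq_nil_iff]
  cases itemlist with
  | nil => simp
  | cons x xs =>
    simp only [if_neg (List.cons_ne_nil x xs), List.length_cons, zero_add, gt_iff_lt]
    rw [if_pos (by positivity)]
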